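-- pv_equiv track=rewrite | github.com/oligogenic/ARBOCK | arbock/rule_mining/unification_mining.py | is_unifiable
-- ===== SOURCE A (Python) =====
-- from collections import defaultdict
--
-- def is_unifiable(metapath_set):
--     '''
--     Check if a set of metapaths is unifiable (i.e having some common intermediate node types).
--     :param metapath_set: the set of metapaths
--     :return: True if the set is unifiable, False otherwise
--     '''
--     if len(metapath_set) == 1:
--         return False
--     node_type_to_mp_count = defaultdict(int)
--     for metapath in metapath_set:
--         edge_types, node_types, edge_directions = metapath
--         unique_intermediate_node_types = set(node_types[1:-1])
--         for node_type in unique_intermediate_node_types: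
--             node_type_to_mp_count[node_type] += 1
--     return any(i >= 2 for i in node_type_to_mp_count.values())
-- ===== SOURCE B (Python) =====
-- def is_unifiable(metapath_set):
--     mids = [set(node_types[1:-1]) for _, node_types, _ in metapath_set]
--     def collide(ms):
--         if not ms:
--             return False
--         head, rest = ms[0], ms[1:]
--         return any(head & s for s in rest) or collide(rest)
--     return collide(mids)
-- ===== Notes on version B (the rewrite author's own statement) =====
-- stated objective: alternative
-- what changed: Replaced A's global occurrence-counting (defaultdict of per-metapath counts plus a final any(count>=2) scan) with a two-stage pairwise algorithm: first materialise the list of deduped intermediate-type sets, then recursively check whether any pair of distinct sets intersects (head intersected against each later set, then recurse on the tail); no counting structure exists. Trade-off: B is quadratic in the number of metapaths but needs no dictionary and short-circuits at the first intersecting pair.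
import Mathlib
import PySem

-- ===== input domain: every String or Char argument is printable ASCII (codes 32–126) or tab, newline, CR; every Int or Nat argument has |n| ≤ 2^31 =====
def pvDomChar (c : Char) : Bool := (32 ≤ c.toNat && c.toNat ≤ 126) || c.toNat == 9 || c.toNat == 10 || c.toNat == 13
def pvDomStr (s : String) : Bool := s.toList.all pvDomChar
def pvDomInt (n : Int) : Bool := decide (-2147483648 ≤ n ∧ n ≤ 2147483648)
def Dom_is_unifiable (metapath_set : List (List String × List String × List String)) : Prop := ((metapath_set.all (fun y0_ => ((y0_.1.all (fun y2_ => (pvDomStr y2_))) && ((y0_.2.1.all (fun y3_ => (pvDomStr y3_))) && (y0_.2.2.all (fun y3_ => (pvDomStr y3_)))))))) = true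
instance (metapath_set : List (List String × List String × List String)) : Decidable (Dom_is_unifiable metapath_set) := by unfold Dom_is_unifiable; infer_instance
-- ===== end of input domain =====

-- B replaces A's occurrence-counting dict plus final scan with a two-stage pairwise
-- algorithm: build the list of deduped intermediate-type sets, then recursively check
-- whether any pair of distinct sets intersects (objective: alternative; quadratic pairwise
-- scan instead of a count dict, no speed claim).

-- ===== PORT A =====
def is_unifiable (metapath_set : List (List String × List String × List String)) : Bool :=
  if metapath_set.length == 1 then false
  else
    let node_type_to_mp_count : PySem.Dict String Int :=
      metapath_set.foldl (fun d metapath =>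
        let node_types := metapath.2.1
        let unique_intermediate_node_types :=
          PySem.Set.ofList (PySem.List.slice node_types (some 1) (some (-1)))
        unique_intermediate_node_types.foldl
          (fun d node_type => d.modify node_type 0 (· + 1)) d)
        PySem.Dict.empty
    node_type_to_mp_count.values.any (fun i => 2 ≤ i)

-- ===== PORT B =====
-- the inner recursive helper `collide` of Source B (ms[0] / ms[1:] on a nonempty list = head / tail)
def is_unifiable_collide (ms : List (PySem.Set String)) : Bool :=
  match ms with
  | [] => false
  | head :: rest =>
    (rest.any (fun s => !(PySem.Set.inter head s).isEmpty)) || is_unifiable_collide rest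

def is_unifiable_alt (metapath_set : List (List String × List String × List String)) : Bool :=
  let mids := metapath_set.map (fun mp =>
    PySem.Set.ofList (PySem.List.slice mp.2.1 (some 1) (some (-1))))
  is_unifiable_collide mids

-- ===== PRECONDITION & SPEC =====
def Spec_is_unifiable (metapath_set : List (List String × List String × List String)) (out : Bool) : Prop := out = is_unifiable_alt metapath_set
instance (metapath_set : List (List String × List String × List String)) (out : Bool) : Decidable (Spec_is_unifiable metapath_set out) := by unfold Spec_is_unifiable; infer_instance

-- ===== CLAIM (what is proved, stated in full; the proofs are below) =====
def Claim_equal_is_unifiable : Prop := ∀ (metapath_set : List (List String × List String × List String)), Dom_is_unifiable metapath_set → Spec_is_unifiable metapath_set (is_unifiable metapath_set)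

-- ===== LEMMAS AND PROOFS =====

-- the deduped intermediate node types of one metapath (used by both characterisations)
def uniqInter (mp : List String × List String × List String) : List String :=
  PySem.Set.ofList (PySem.List.slice mp.2.1 (some 1) (some (-1)))

-- A returns true iff some node type occurs in the intermediate sets of at least two metapaths,
-- i.e. iff the concatenation of the (per-metapath deduped) intermediate type lists has a duplicate.
theorem isu_A_char (ms : List (List String × List String × List String)) :
    is_unifiable ms = true ↔ ¬ ((ms.map uniqInter).flatten).Nodup := by
  unfold is_unifiable
  by_cases h1 : ms.length = 1
  · obtain ⟨mp, rfl⟩ := List.length_eq_one_iff.mp h1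
    simp [uniqInter, PySem.Set.nodup_ofList]
  · simp only [beq_iff_eq, h1, if_false]
    have hd : ms.foldl (fun d metapath =>
        (PySem.Set.ofList (PySem.List.slice metapath.2.1 (some 1) (some (-1)))).foldl
          (fun d node_type => d.modify node_type 0 (· + 1)) d)
        (PySem.Dict.empty : PySem.Dict String Int)
        = PySem.Dict.counter ((ms.map uniqInter).flatten) := by
      rw [PySem.Dict.counter_eq_foldl, List.foldl_flatten, List.foldl_map]
      rfl
    rw [hd]
    simp only [PySem.Dict.values, PySem.Dict.items_counter, List.map_map, List.any_map,
      List.any_eq_true, Function.comp]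
    constructor
    · rintro ⟨k, hk, h2⟩ hnd
      have hle := List.nodup_iff_count.mp hnd k
      simp only [decide_eq_true_eq] at h2
      have h2' : 2 ≤ List.count k (List.map uniqInter ms).flatten := by exact_mod_cast h2
      omega
    · intro hnd
      have hex : ∃ k, 2 ≤ ((ms.map uniqInter).flatten).count k := by
        by_contra hall
        push_neg at hall
        exact hnd (List.nodup_iff_count.mpr (fun a => by have := hall a; omega))
      obtain ⟨k, hk⟩ := hex
      refine ⟨k, ?_, ?_⟩
      · rw [PySem.Set.mem_ofList]
        exact List.count_pos_iff.mp (by omega)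
      · simp only [decide_eq_true_eq]
        exact_mod_cast hk

-- B's recursive pairwise scan finds a collision iff flattening the (individually duplicate-free)
-- sets creates a duplicate.
theorem isu_B_char (ms : List (PySem.Set String)) (h : ∀ s ∈ ms, s.Nodup) :
    is_unifiable_collide ms = true ↔ ¬ ms.flatten.Nodup := by
  induction ms with
  | nil => simp [is_unifiable_collide]
  | cons a rest ih =>
    have ha : a.Nodup := h a (List.mem_cons_self)
    have hrest := ih (fun s hs => h s (List.mem_cons_of_mem _ hs))
    rw [is_unifiable_collide]
    simp only [List.flatten_cons, List.nodup_append, Bool.or_eq_true, hrest,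
      List.any_eq_true, Bool.not_eq_true', List.isEmpty_eq_false_iff_exists_mem,
      PySem.Set.mem_inter]
    constructor
    · rintro (⟨s, hs, x, hxa, hxs⟩ | hnd) ⟨_, hnd', hdis⟩
      · exact hdis x hxa x (List.mem_flatten.mpr ⟨s, hs, hxs⟩) rfl
      · exact hnd hnd'
    · intro hnd
      by_cases hd : rest.flatten.Nodup
      · left
        by_contra hno
        push_neg at hno
        refine hnd ⟨ha, hd, fun x hxa y hyf hxy => ?_⟩
        obtain ⟨s, hs, hys⟩ := List.mem_flatten.mp hyf
        exact (hno s hs) x hxa (hxy ▸ hys)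
      · exact Or.inr hd

-- ===== VERDICT (by name: the statement is the Claim_ definition above) =====
theorem is_unifiable_spec : Claim_equal_is_unifiable := by
  intro ms _
  show is_unifiable ms = is_unifiable_alt ms
  rw [Bool.eq_iff_iff, isu_A_char,
    show is_unifiable_alt ms
        = is_unifiable_collide (ms.map uniqInter) from rfl,
    isu_B_char (ms.map uniqInter)
      (by intro s hs; obtain ⟨mp, _, rfl⟩ := List.mem_map.mp hs; exact PySem.Set.nodup_ofList _)]
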